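-- pv_equiv track=rewrite | github.com/Alex-jjh/ai-agent-accessibility | analysis/archive/pilot4_deep_dives.py | get_final_answer
-- ===== SOURCE A (Python) =====
-- def get_final_answer(t):
--     """Extract the agent's final send_msg_to_user answer."""
--     for s in reversed(t.get('steps', [])):
--         a = s.get('action', '')
--         if 'send_msg_to_user' in a:
--             # Extract message content
--             start = a.find('("')
--             end = a.rfind('")')
--             if start >= 0 and end > start:
--                 return a[start+2:end][:200]
--             return a[18:200]  # fallback
--     return None
-- ===== SOURCE B (Python) =====
-- def _extract(a):
--     """Extract the message text from one send_msg_to_user action string."""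
--     start = a.find('("')
--     end = a.rfind('")')
--     if start >= 0 and end > start:
--         return a[start+2:end][:200]
--     return a[18:200]  # fallback
--
--
-- def get_final_answer(t):
--     """Extract the agent's final send_msg_to_user answer."""
--     answers = [
--         _extract(s.get('action', ''))
--         for s in t.get('steps', [])
--         if 'send_msg_to_user' in s.get('action', '')
--     ]
--     return answers[-1] if answers else None
-- ===== Notes on version B (the rewrite author's own statement) =====
-- stated objective: simpler
-- what changed: Replaces the reversed scan with early return by a staged map-filter: a comprehension extracts the message from every matching step, then the last extracted answer (or None) is returned.
import Mathlib
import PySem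

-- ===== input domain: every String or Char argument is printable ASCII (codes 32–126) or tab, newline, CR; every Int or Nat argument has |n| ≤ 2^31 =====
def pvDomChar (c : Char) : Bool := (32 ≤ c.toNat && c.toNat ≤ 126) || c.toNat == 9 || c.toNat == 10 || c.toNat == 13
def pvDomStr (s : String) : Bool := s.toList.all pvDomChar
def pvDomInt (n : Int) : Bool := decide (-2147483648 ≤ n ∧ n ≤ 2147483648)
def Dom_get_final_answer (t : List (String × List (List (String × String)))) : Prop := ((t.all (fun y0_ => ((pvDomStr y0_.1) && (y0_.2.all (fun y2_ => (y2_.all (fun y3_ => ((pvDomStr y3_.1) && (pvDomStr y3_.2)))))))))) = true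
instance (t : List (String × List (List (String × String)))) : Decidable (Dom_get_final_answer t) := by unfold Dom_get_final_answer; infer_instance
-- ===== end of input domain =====

-- ===== PORT A =====
-- B change: a staged map-filter (extract the message from every matching step, then take the last answer) instead of A's reversed scan with early return (objective: simpler decomposition).
def pvLoopA : List (List (String × String)) → Option String
  | [] => none
  | s :: rest =>
    let a := PySem.Dict.getD (PySem.Dict.mk s) "action" ""
    if PySem.Str.isIn "send_msg_to_user" a then
      let start := PySem.Str.find a "(\""
      let e := PySem.Str.rfind a "\")"
      if start ≥ 0 ∧ e > start then
        some (PySem.Str.slice (PySem.Str.slice a (some (start + 2)) (some e)) none (some 200))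
      else
        some (PySem.Str.slice a (some 18) (some 200))
    else pvLoopA rest

def get_final_answer (t : List (String × List (List (String × String)))) : Option String :=
  pvLoopA (PySem.Dict.getD (PySem.Dict.mk t) "steps" []).reverse

-- ===== PORT B =====
def pvExtractB (a : String) : String :=
  let start := PySem.Str.find a "(\""
  let e := PySem.Str.rfind a "\")"
  if start ≥ 0 ∧ e > start then
    PySem.Str.slice (PySem.Str.slice a (some (start + 2)) (some e)) none (some 200)
  else
    PySem.Str.slice a (some 18) (some 200)

def pvAnswerB (s : List (String × String)) : Option String :=
  if PySem.Str.isIn "send_msg_to_user" (PySem.Dict.getD (PySem.Dict.mk s) "action" "") then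
    some (pvExtractB (PySem.Dict.getD (PySem.Dict.mk s) "action" ""))
  else none

def get_final_answer_alt (t : List (String × List (List (String × String)))) : Option String :=
  let answers := (PySem.Dict.getD (PySem.Dict.mk t) "steps" []).filterMap pvAnswerB
  answers.getLast?

-- ===== PRECONDITION & SPEC =====
def Spec_get_final_answer (t : List (String × List (List (String × String)))) (out : Option String) : Prop := out = get_final_answer_alt t
instance (t : List (String × List (List (String × String)))) (out : Option String) : Decidable (Spec_get_final_answer t out) := by unfold Spec_get_final_answer; infer_instance

-- ===== CLAIM (what is proved, stated in full; the proofs are below) =====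
def Claim_equal_get_final_answer : Prop := ∀ (t : List (String × List (List (String × String)))), Dom_get_final_answer t → Spec_get_final_answer t (get_final_answer t)

-- ===== LEMMAS AND PROOFS =====
theorem pvAnswerB_eq (s : List (String × String)) :
    pvAnswerB s =
      (let a := PySem.Dict.getD (PySem.Dict.mk s) "action" ""
       if PySem.Str.isIn "send_msg_to_user" a then
         let start := PySem.Str.find a "(\""
         let e := PySem.Str.rfind a "\")"
         if start ≥ 0 ∧ e > start then
           some (PySem.Str.slice (PySem.Str.slice a (some (start + 2)) (some e)) none (some 200))
         else
           some (PySem.Str.slice a (some 18) (some 200))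
       else none) := by
  unfold pvAnswerB pvExtractB
  by_cases h : PySem.Str.isIn "send_msg_to_user" (PySem.Dict.getD (PySem.Dict.mk s) "action" "") = true
  · simp only [h, if_true]
    split <;> rfl
  · simp only [h, Bool.false_eq_true, if_false]

theorem pvLoopA_eq_head_filterMap (l : List (List (String × String))) :
    pvLoopA l = (l.filterMap pvAnswerB).head? := by
  induction l with
  | nil => simp [pvLoopA]
  | cons s rest ih =>
    rw [List.filterMap_cons, pvAnswerB_eq]
    show (let a := PySem.Dict.getD (PySem.Dict.mk s) "action" ""
          if PySem.Str.isIn "send_msg_to_user" a then _ else pvLoopA rest) = _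
    by_cases h : PySem.Str.isIn "send_msg_to_user" (PySem.Dict.getD (PySem.Dict.mk s) "action" "") = true
    · simp only [h, if_true]
      split <;> rfl
    · simp only [Bool.not_eq_true] at h
      simp only [h, Bool.false_eq_true, if_false]
      exact ih

-- ===== VERDICT (by name: the statement is the Claim_ definition above) =====
theorem get_final_answer_spec : Claim_equal_get_final_answer := by
  intro t _
  unfold Spec_get_final_answer get_final_answer get_final_answer_alt
  rw [pvLoopA_eq_head_filterMap, List.filterMap_reverse, List.head?_reverse]
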